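-- pv_equiv track=rewrite | github.com/enzoccravo/bussscamina | buscaminas.py | filas_validas
-- ===== SOURCE A (Python) =====
-- def filas_validas(lista: list[str]) -> bool:
--     for linea in lista:
--         i: int = 0
--         anterior_coma: bool = False
--         while i < len(linea):
--             c: str = linea[i]
--             if c == ',':
--                 if anterior_coma:
--                     return False  # dos comas seguidas
--                 anterior_coma = True
--             else:
--                 anterior_coma = False
--             i += 1
--     return True
-- ===== SOURCE B (Python) =====
-- def filas_validas(lista: list[str]) -> bool:
--     return all('' not in linea.split(',')[1:-1] for linea in lista)
-- ===== Notes on version B (the rewrite author's own statement) =====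
-- stated objective: alternative
-- what changed: Instead of scanning characters with a previous-comma flag, B splits each line into its comma-separated fields and checks that no field strictly between the first and last is empty (an empty interior field is exactly a pair of adjacent commas).
import Mathlib
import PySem

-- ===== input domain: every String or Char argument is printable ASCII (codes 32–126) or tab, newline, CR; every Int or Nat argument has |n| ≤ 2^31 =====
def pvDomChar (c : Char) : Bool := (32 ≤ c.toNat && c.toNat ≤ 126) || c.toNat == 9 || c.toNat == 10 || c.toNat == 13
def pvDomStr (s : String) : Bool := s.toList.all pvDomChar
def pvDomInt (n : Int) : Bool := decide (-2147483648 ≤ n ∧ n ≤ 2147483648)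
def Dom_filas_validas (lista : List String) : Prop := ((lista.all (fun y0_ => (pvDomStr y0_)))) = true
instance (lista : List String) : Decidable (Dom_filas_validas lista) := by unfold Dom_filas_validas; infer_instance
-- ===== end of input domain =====

-- B replaces A's flagged character scan by splitting each line into its comma-separated
-- fields and checking no interior field is empty (alternative algorithm, same cost).

-- ===== PORT A =====
-- inner while loop of A: returns true iff the scan hits a comma whose predecessor was a comma
-- (A then returns False); `prev` is A's `anterior_coma`.
def pvScanLine : List Char → Bool → Bool
  | [], _ => false
  | c :: rest, prev =>
    if c = ',' then
      if prev then true else pvScanLine rest true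
    else
      pvScanLine rest false

def filas_validas (lista : List String) : Bool :=
  match lista with
  | [] => true
  | linea :: rest =>
    if pvScanLine linea.toList false then false else filas_validas rest

-- ===== PORT B =====
-- linea.split(',')[1:-1]; '' in … is membership of the empty field [] in that slice.
def filas_validas_alt (lista : List String) : Bool :=
  lista.all (fun linea =>
    !((PySem.List.slice (PySem.Chars.splitOn linea.toList [',']) (some 1) (some (-1))).contains []))

-- ===== PRECONDITION & SPEC =====
def Spec_filas_validas (lista : List String) (out : Bool) : Prop := out = filas_validas_alt lista
instance (lista : List String) (out : Bool) : Decidable (Spec_filas_validas lista out) := by unfold Spec_filas_validas; infer_instance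

-- ===== CLAIM (what is proved, stated in full; the proofs are below) =====
def Claim_equal_filas_validas : Prop := ∀ (lista : List String), Dom_filas_validas lista → Spec_filas_validas lista (filas_validas lista)

-- ===== LEMMAS AND PROOFS =====

-- The simple structural recurrence computed by splitOn on the single-char separator ','.
def pvSplitComma : List Char → List (List Char)
  | [] => [[]]
  | c :: rest =>
    if c = ',' then [] :: pvSplitComma rest
    else (pvSplitComma rest).modifyHead (c :: ·)

theorem pvSplitComma_ne_nil (cs : List Char) : pvSplitComma cs ≠ [] := by
  induction cs with
  | nil => simp [pvSplitComma]
  | cons c rest ih =>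
    simp only [pvSplitComma]
    split_ifs
    · simp
    · rcases h : pvSplitComma rest with _ | ⟨p, ps⟩
      · exact absurd h ih
      · simp [List.modifyHead]

theorem pvSplitOn_go_spec (l cur : List Char) (accs : List (List Char)) (fuel : Nat)
    (h : l.length ≤ fuel) :
    PySem.Chars.splitOn.go [','] fuel l cur accs =
      accs.reverse ++
        (match pvSplitComma l with
         | [] => []
         | p :: ps => (cur.reverse ++ p) :: ps) := by
  induction l generalizing fuel cur accs with
  | nil =>
    cases fuel with
    | zero => simp [PySem.Chars.splitOn.go, pvSplitComma]
    | succ f => simp [PySem.Chars.splitOn.go, pvSplitComma]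
  | cons c rest ih =>
    cases fuel with
    | zero => simp at h
    | succ f =>
      have hf : rest.length ≤ f := by simp at h; omega
      by_cases hc : c = ','
      · subst hc
        rw [show PySem.Chars.splitOn.go [','] (f+1) (',' :: rest) cur accs =
              PySem.Chars.splitOn.go [','] f rest [] (cur.reverse :: accs) from by
          simp [PySem.Chars.splitOn.go, List.isPrefixOf]]
        rw [ih [] (cur.reverse :: accs) f hf]
        rcases hps : pvSplitComma rest with _ | ⟨p, ps⟩
        · exact absurd hps (pvSplitComma_ne_nil rest)
        · simp [pvSplitComma, hps]
      · rw [show PySem.Chars.splitOn.go [','] (f+1) (c :: rest) cur accs =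
              PySem.Chars.splitOn.go [','] f rest (c :: cur) accs from by
          have hp : ([','] : List Char).isPrefixOf (c :: rest) = false := by
            simp [List.isPrefixOf]
            exact fun h => hc h.symm
          simp [PySem.Chars.splitOn.go, hp]]
        rw [ih (c :: cur) accs f hf]
        rcases hps : pvSplitComma rest with _ | ⟨p, ps⟩
        · exact absurd hps (pvSplitComma_ne_nil rest)
        · simp [pvSplitComma, hc, hps, List.modifyHead]

theorem pvSplitOn_eq (cs : List Char) :
    PySem.Chars.splitOn cs [','] = pvSplitComma cs := by
  unfold PySem.Chars.splitOn
  rw [pvSplitOn_go_spec cs [] [] (cs.length + 1) (by omega)]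
  rcases hps : pvSplitComma cs with _ | ⟨p, ps⟩
  · exact absurd hps (pvSplitComma_ne_nil cs)
  · simp

-- parts[1:-1] = dropLast after drop 1
theorem pvSlice_eq (xs : List (List Char)) :
    PySem.List.slice xs (some 1) (some (-1)) = (xs.drop 1).dropLast := by
  cases xs with
  | nil => rfl
  | cons x tl =>
    simp [PySem.List.slice, PySem.List.clampIdx, List.dropLast_eq_take]
    rw [if_neg (by omega : ¬((tl.length : Int) < 0))]
    omega

theorem pvPrefix_iff (rest : List Char) :
    ([',', ','] <+: (',' :: rest)) ↔ rest.head? = some ',' := by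
  cases rest with
  | nil => simp [List.cons_prefix_cons]
  | cons d tl => simp [List.cons_prefix_cons, eq_comm]

theorem pvInfix_comma (rest : List Char) :
    ([',', ','] <:+: (',' :: rest)) ↔ (rest.head? = some ',' ∨ [',', ','] <:+: rest) := by
  rw [List.infix_cons_iff, pvPrefix_iff]

theorem pvInfix_not_comma (c : Char) (rest : List Char) (hc : c ≠ ',') :
    ([',', ','] <:+: (c :: rest)) ↔ [',', ','] <:+: rest := by
  rw [List.infix_cons_iff]
  constructor
  · rintro (h | h)
    · rw [List.cons_prefix_cons] at h; exact absurd h.1.symm hc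
    · exact h
  · exact Or.inr

-- joint characterisation: empty interior field / empty non-last field vs ',,' as infix
theorem pvJoint (cs : List Char) :
    ([] ∈ ((pvSplitComma cs).drop 1).dropLast ↔ [',', ','] <:+: cs) ∧
    ([] ∈ (pvSplitComma cs).dropLast ↔ (cs.head? = some ',' ∨ [',', ','] <:+: cs)) := by
  induction cs with
  | nil => simp [pvSplitComma]
  | cons c rest ih =>
    obtain ⟨ihL, ihM⟩ := ih
    rcases hps : pvSplitComma rest with _ | ⟨p, ps⟩
    · exact absurd hps (pvSplitComma_ne_nil rest)
    by_cases hc : c = ','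
    · subst hc
      have hrw : pvSplitComma (',' :: rest) = [] :: pvSplitComma rest := by
        simp [pvSplitComma]
      refine ⟨?_, ?_⟩
      · rw [hrw, List.drop_succ_cons, List.drop_zero, ihM, pvInfix_comma]
      · rw [hrw, hps, List.dropLast_cons_of_ne_nil (by simp)]
        simp
    · have hrw : pvSplitComma (c :: rest) = (pvSplitComma rest).modifyHead (c :: ·) := by
        simp [pvSplitComma, hc]
      refine ⟨?_, ?_⟩
      · rw [hrw, hps]
        simp only [List.modifyHead, List.drop_succ_cons, List.drop_zero]
        rw [hps] at ihL
        simp only [List.drop_succ_cons, List.drop_zero] at ihL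
        rw [ihL, pvInfix_not_comma c rest hc]
      · rw [hrw, hps]
        simp only [List.modifyHead]
        rcases hpsn : ps with _ | ⟨q, qs⟩
        · subst hpsn
          rw [hps, List.dropLast_singleton] at ihM
          simp only [List.not_mem_nil, false_iff, not_or] at ihM
          simp [List.dropLast_singleton, hc, pvInfix_not_comma c rest hc, ihM.2]
        · subst hpsn
          rw [List.dropLast_cons_of_ne_nil (by simp)]
          rw [hps] at ihL
          simp only [List.drop_succ_cons, List.drop_zero] at ihL
          simp only [List.mem_cons, List.head?_cons, pvInfix_not_comma c rest hc]
          rw [ihL]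
          simp [hc]

theorem pvScanLine_iff (cs : List Char) (prev : Bool) :
    pvScanLine cs prev = true ↔ ((prev = true ∧ cs.head? = some ',') ∨ [',', ','] <:+: cs) := by
  induction cs generalizing prev with
  | nil => simp [pvScanLine]
  | cons c rest ih =>
    by_cases hc : c = ','
    · subst hc
      cases prev with
      | true => simp [pvScanLine, List.infix_cons_iff]
      | false =>
        show pvScanLine rest true = true ↔ _
        rw [ih]
        simp only [Bool.false_eq_true, false_and, false_or, List.infix_cons_iff,
          List.head?_cons, true_and]
        constructor
        · rintro (h | h)
          · cases rest with
            | nil => simp at h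
            | cons d tl =>
              simp only [List.head?_cons, Option.some.injEq] at h
              exact Or.inl (by simp [h, List.cons_prefix_cons, List.nil_prefix])
          · exact Or.inr h
        · rintro (h | h)
          · cases rest with
            | nil => simp [List.cons_prefix_cons] at h
            | cons d tl =>
              rw [List.cons_prefix_cons] at h
              rw [List.cons_prefix_cons] at h
              exact Or.inl (by simp [h.2.1.symm])
          · exact Or.inr h
    · rw [show pvScanLine (c :: rest) prev = pvScanLine rest false from by
        simp [pvScanLine, hc], ih]
      simp only [Bool.false_eq_true, false_and, false_or, List.infix_cons_iff,
        List.head?_cons, Option.some.injEq]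
      constructor
      · intro h; exact Or.inr (Or.inr h)
      · rintro (⟨-, h⟩ | h | h)
        · exact absurd h hc
        · rw [List.cons_prefix_cons] at h; exact absurd h.1.symm hc
        · exact h

theorem pvLine_eq (linea : String) :
    pvScanLine linea.toList false =
      ((PySem.List.slice (PySem.Chars.splitOn linea.toList [',']) (some 1) (some (-1))).contains []) := by
  rw [pvSplitOn_eq, pvSlice_eq]
  rcases hb : ((pvSplitComma linea.toList).drop 1).dropLast.contains ([] : List Char) with _ | _
  · rw [List.contains_eq_mem, decide_eq_false_iff_not] at hb
    rw [← Bool.not_eq_true, pvScanLine_iff]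
    simp only [Bool.false_eq_true, false_and, false_or]
    rw [← (pvJoint linea.toList).1]
    exact hb
  · rw [pvScanLine_iff]
    rw [List.contains_eq_mem, decide_eq_true_eq] at hb
    exact Or.inr ((pvJoint linea.toList).1.mp hb)

theorem filas_validas_eq (lista : List String) : filas_validas lista = filas_validas_alt lista := by
  induction lista with
  | nil => rfl
  | cons linea rest ih =>
    simp only [filas_validas, filas_validas_alt, List.all_cons, pvLine_eq]
    cases hb : ((PySem.List.slice (PySem.Chars.splitOn linea.toList [',']) (some 1) (some (-1))).contains ([] : List Char)) with
    | false => simpa [filas_validas_alt] using ih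
    | true => simp

-- ===== VERDICT (by name: the statement is the Claim_ definition above) =====
theorem filas_validas_spec : Claim_equal_filas_validas := by
  intro lista _
  exact filas_validas_eq lista
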